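-- pv_equiv track=rewrite | github.com/shivesh-ganju/Hidden-Markov-Model-Viterbi | preprocessing.py | createPrefixDict
-- ===== SOURCE A (Python) =====
-- def createPrefixDict(words,tag):
-- 	prefix={}
-- 	prefix_length=6
-- 	for i in range(0,len(words)):
-- 		for j in range(2,prefix_length+1):
-- 			prefix1=""
-- 			if len(words[i])>j-1:
-- 				prefix1=words[i][:j]
-- 			if prefix1 in prefix:
-- 				if tag[i] in prefix[prefix1]:
-- 					prefix[prefix1][tag[i]]=prefix[prefix1][tag[i]]+1
-- 				else:
-- 					prefix[prefix1][tag[i]]=1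
-- 			else:
-- 				prefix[prefix1]={tag[i]:1}
-- 	return prefix
-- ===== SOURCE B (Python) =====
-- def createPrefixDict(words, tag):
--     # Phase 1: count how many times each (word, tag) pair occurs (insertion order
--     # of the dict = order of first occurrence of the pair).
--     pair_counts = {}
--     for wt in zip(words, tag):
--         pair_counts[wt] = pair_counts.get(wt, 0) + 1
--     # Phase 2: one pass over the DISTINCT pairs only; for each, add its whole
--     # count to the 5 prefix buckets at once (prefix lengths 2..6, '' if too short).
--     result = {}
--     for (w, t), c in pair_counts.items():
--         for j in range(2, 7):
--             p = w[:j] if len(w) >= j else ""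
--             inner = result.setdefault(p, {})
--             inner[t] = inner.get(t, 0) + c
--     return result
-- ===== Notes on version B (the rewrite author's own statement) =====
-- stated objective: alternative
-- what changed: Instead of incrementing the nested dict once per word occurrence and prefix length, B first counts duplicate (word, tag) pairs into a flat dict, then does the prefix-slicing and nested-dict work only once per DISTINCT pair, adding the whole multiplicity at a time.
import Mathlib
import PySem

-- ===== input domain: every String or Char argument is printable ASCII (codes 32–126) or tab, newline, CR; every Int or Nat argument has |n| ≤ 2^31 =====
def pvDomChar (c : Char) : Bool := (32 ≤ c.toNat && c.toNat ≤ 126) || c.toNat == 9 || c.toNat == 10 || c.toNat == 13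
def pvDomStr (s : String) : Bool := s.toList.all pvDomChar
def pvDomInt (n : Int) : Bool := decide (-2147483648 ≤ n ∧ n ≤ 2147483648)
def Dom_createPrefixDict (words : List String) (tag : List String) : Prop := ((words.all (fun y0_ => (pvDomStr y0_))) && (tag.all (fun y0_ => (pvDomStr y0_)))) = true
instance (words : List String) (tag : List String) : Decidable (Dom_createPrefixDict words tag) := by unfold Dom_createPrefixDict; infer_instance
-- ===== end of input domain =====

-- B first counts duplicate (word, tag) pairs, then does the prefix work once per distinct pair, adding whole counts; alternative decomposition, same result.
-- ===== PORT A =====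
def createPrefixDict (words : List String) (tag : List String) : List (String × List (String × Int)) :=
  let d : PySem.Dict String (PySem.Dict String Int) :=
    (PySem.List.pyRange 0 (words.length : Int) 1).foldl (fun pre i =>
      (PySem.List.pyRange 2 ((6 : Int) + 1) 1).foldl (fun pre j =>
        let wi := PySem.List.pyGetD words i ""
        let ti := PySem.List.pyGetD tag i ""
        let prefix1 : String := if PySem.Str.len wi > j - 1 then PySem.Str.slice wi none (some j) else ""
        if pre.contains prefix1 then
          let inner := (pre.get? prefix1).getD PySem.Dict.empty
          if inner.contains ti then
            pre.insert prefix1 (inner.insert ti (inner.getD ti 0 + 1))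
          else
            pre.insert prefix1 (inner.insert ti 1)
        else
          pre.insert prefix1 (PySem.Dict.ofList [(ti, 1)])) pre) PySem.Dict.empty
  d.items.map (fun kv => (kv.1, kv.2.items))

-- ===== PORT B =====
def createPrefixDict_alt (words : List String) (tag : List String) : List (String × List (String × Int)) :=
  -- Phase 1: pair_counts[wt] = pair_counts.get(wt, 0) + 1 over zip(words, tag)
  let pairCounts : PySem.Dict (String × String) Int :=
    (words.zip tag).foldl (fun d wt => d.insert wt (d.getD wt 0 + 1)) PySem.Dict.empty
  -- Phase 2: once per distinct pair, add its whole count to the 5 prefix buckets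
  let result : PySem.Dict String (PySem.Dict String Int) :=
    pairCounts.items.foldl (fun r x =>
      (PySem.List.pyRange 2 7 1).foldl (fun r j =>
        let p : String := if PySem.Str.len x.1.1 ≥ j then PySem.Str.slice x.1.1 none (some j) else ""
        let inner := (r.get? p).getD PySem.Dict.empty
        r.insert p (inner.insert x.1.2 (inner.getD x.1.2 0 + x.2))) r) PySem.Dict.empty
  result.items.map (fun kv => (kv.1, kv.2.items))

-- ===== PRECONDITION & SPEC =====
-- Pre_ excludes inputs where tag is shorter than words: there A raises IndexError on tag[i].
def Pre_createPrefixDict (words : List String) (tag : List String) : Prop := words.length ≤ tag.length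
instance (words : List String) (tag : List String) : Decidable (Pre_createPrefixDict words tag) := by unfold Pre_createPrefixDict; infer_instance
def pvWitness_createPrefixDict : List String × List String := (["abcdef", "ab"], ["N", "V"])

def Spec_createPrefixDict (words : List String) (tag : List String) (out : List (String × List (String × Int))) : Prop := out = createPrefixDict_alt words tag
instance (words : List String) (tag : List String) (out : List (String × List (String × Int))) : Decidable (Spec_createPrefixDict words tag out) := by unfold Spec_createPrefixDict; infer_instance

-- ===== CLAIM (what is proved, stated in full; the proofs are below) =====
def Claim_equal_createPrefixDict : Prop := ∀ (words : List String) (tag : List String), Dom_createPrefixDict words tag → Pre_createPrefixDict words tag → Spec_createPrefixDict words tag (createPrefixDict words tag)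

-- ===== LEMMAS AND PROOFS =====

-- The 5 (prefix, tag) events one (word, tag) pair contributes (lengths 2..6, '' when too short).
def pvEv (wt : String × String) : List (String × String) :=
  (PySem.List.pyRange 2 7 1).map (fun j =>
    ((if PySem.Str.len wt.1 ≥ j then PySem.Str.slice wt.1 none (some j) else ""), wt.2))

-- The single nested-dict update A performs for one (prefix, tag) event.
def pvStepA (pre : PySem.Dict String (PySem.Dict String Int)) (e : String × String) :
    PySem.Dict String (PySem.Dict String Int) :=
  if pre.contains e.1 then
    let inner := (pre.get? e.1).getD PySem.Dict.empty
    if inner.contains e.2 then pre.insert e.1 (inner.insert e.2 (inner.getD e.2 0 + 1))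
    else pre.insert e.1 (inner.insert e.2 1)
  else pre.insert e.1 (PySem.Dict.ofList [(e.2, 1)])

-- Overwrite step: set result[p][t] to exactly the given count.
def pvStepB (r : PySem.Dict String (PySem.Dict String Int)) (x : (String × String) × Int) :
    PySem.Dict String (PySem.Dict String Int) :=
  r.insert x.1.1 (((r.get? x.1.1).getD PySem.Dict.empty).insert x.1.2 x.2)

-- The single nested-dict update B performs for one ((prefix, tag), count) item: add the count.
def pvStepK (r : PySem.Dict String (PySem.Dict String Int)) (x : (String × String) × Int) :
    PySem.Dict String (PySem.Dict String Int) :=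
  let inner := (r.get? x.1.1).getD PySem.Dict.empty
  r.insert x.1.1 (inner.insert x.1.2 (inner.getD x.1.2 0 + x.2))

-- Explicit form of the nested dict built from a flat association list of ((prefix, tag), count).
def pvInner (its : List ((String × String) × Int)) (p : String) : PySem.Dict String Int :=
  PySem.Dict.mk ((its.filter (fun x => x.1.1 == p)).map (fun x => (x.1.2, x.2)))

def pvNested (its : List ((String × String) × Int)) : PySem.Dict String (PySem.Dict String Int) :=
  PySem.Dict.mk ((PySem.Set.ofList (its.map (fun x => x.1.1))).map (fun p => (p, pvInner its p)))

-- counter items, in the explicit form PySem.Dict.items_counter gives.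
def pvCItems (P : List (String × String)) : List ((String × String) × Int) :=
  (PySem.Set.ofList P).map (fun k => (k, (List.count k P : Int)))

-- Aggregation of a flat ((prefix,tag), count) list: first-occurrence key order, summed counts.
def pvAgg (M : List ((String × String) × Int)) : List ((String × String) × Int) :=
  (PySem.Set.ofList (M.map Prod.fst)).map
    (fun k => (k, ((M.filter (fun x => x.1 == k)).map Prod.snd).sum))

lemma pvGetMk {v : Type} (s : List String) (f : String → v) (q : String) :
    (PySem.Dict.mk (s.map (fun p => (p, f p)))).get? q = if q ∈ s then some (f q) else none := by
  induction s with
  | nil => rfl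
  | cons a s ih =>
    rw [List.map_cons, PySem.Dict.get?_mk_cons]
    by_cases h : a = q
    · subst h; simp
    · simp only [List.mem_cons]
      rw [if_neg (by simpa using h), ih]
      by_cases hq : q ∈ s
      · rw [if_pos hq, if_pos (Or.inr hq)]
      · rw [if_neg hq, if_neg (by rintro (rfl | hm) <;> [exact h rfl; exact hq hm])]

lemma pvKeyVal {a b : Type} (l : List (a × b)) (hnd : (l.map Prod.fst).Nodup)
    {k : a} {v w : b} (h1 : (k, v) ∈ l) (h2 : (k, w) ∈ l) : v = w := by
  induction l with
  | nil => cases h1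
  | cons x l ih =>
    rw [List.map_cons, List.nodup_cons] at hnd
    rcases List.mem_cons.1 h1 with h1 | h1 <;> rcases List.mem_cons.1 h2 with h2 | h2
    · exact congrArg Prod.snd (h1.trans h2.symm)
    · have hk : x.1 = k := by rw [← h1]
      exact absurd (hk ▸ List.mem_map_of_mem (f := Prod.fst) h2) hnd.1
    · have hk : x.1 = k := by rw [← h2]
      exact absurd (hk ▸ List.mem_map_of_mem (f := Prod.fst) h1) hnd.1
    · exact ih hnd.2 h1 h2

lemma pvOfListSnoc {α : Type} [BEq α] [LawfulBEq α] (l : List α) (x : α) :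
    PySem.Set.ofList (l ++ [x]) =
      if x ∈ l then PySem.Set.ofList l else PySem.Set.ofList l ++ [x] := by
  rw [PySem.Set.ofList_append, PySem.Set.update_cons, PySem.Set.update_nil]
  have : PySem.Set.add (PySem.Set.ofList l) x =
      if x ∈ PySem.Set.ofList l then PySem.Set.ofList l else PySem.Set.ofList l ++ [x] := by
    simp [PySem.Set.add]
  rw [this]
  by_cases h : x ∈ l
  · rw [if_pos ((PySem.Set.mem_ofList l x).2 h), if_pos h]
  · rw [if_neg (fun hm => h ((PySem.Set.mem_ofList l x).1 hm)), if_neg h]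

lemma pvUpdateSubset {α : Type} [BEq α] [LawfulBEq α] (s : PySem.Set α) (l : List α)
    (h : ∀ a ∈ l, a ∈ s) : PySem.Set.update s l = s := by
  induction l generalizing s with
  | nil => rw [PySem.Set.update_nil]
  | cons a l ih =>
    rw [PySem.Set.update_cons]
    have ha : PySem.Set.add s a = s := by simp [PySem.Set.add, h a (by simp)]
    rw [ha]
    exact ih s (fun b hb => h b (by simp [hb]))

lemma pvNested_get? (its : List ((String × String) × Int)) (q : String) :
    (pvNested its).get? q =
      if q ∈ its.map (fun x => x.1.1) then some (pvInner its q) else none := by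
  unfold pvNested
  rw [pvGetMk]
  by_cases h : q ∈ its.map (fun x => x.1.1)
  · rw [if_pos ((PySem.Set.mem_ofList _ _).2 h), if_pos h]
  · rw [if_neg (fun hm => h ((PySem.Set.mem_ofList _ _).1 hm)), if_neg h]

lemma pvInner_filter_nil (its : List ((String × String) × Int)) (q : String)
    (h : q ∉ its.map (fun x => x.1.1)) : its.filter (fun x => x.1.1 == q) = [] := by
  rw [List.filter_eq_nil_iff]
  intro x hx hbeq
  exact h (List.mem_map.2 ⟨x, hx, by simpa using hbeq⟩)

lemma pvInner_snoc_ne (its : List ((String × String) × Int)) (y : (String × String) × Int)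
    (p : String) (h : y.1.1 ≠ p) : pvInner (its ++ [y]) p = pvInner its p := by
  unfold pvInner
  rw [List.filter_append]
  simp [h]

lemma pvInner_snoc_eq (its : List ((String × String) × Int)) (y : (String × String) × Int)
    (p : String) (h : y.1.1 = p) :
    (pvInner (its ++ [y]) p).items = (pvInner its p).items ++ [(y.1.2, y.2)] := by
  unfold pvInner
  rw [List.filter_append]
  simp [h]

lemma pvInner_not_contains (its : List ((String × String) × Int)) (e : String × String)
    (he : e ∉ its.map Prod.fst) : (pvInner its e.1).contains e.2 = false := by
  rw [PySem.Dict.contains_eq_decide_mem_keys]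
  simp only [PySem.Dict.keys, pvInner, List.map_map, decide_eq_false_iff_not]
  intro hm
  obtain ⟨x, hx, hx2⟩ := List.mem_map.1 hm
  have hx1 : x.1.1 = e.1 := by simpa using (List.mem_filter.1 hx).2
  have hxe : x.1 = e := Prod.ext hx1 (by simpa using hx2)
  exact he (hxe ▸ List.mem_map_of_mem (f := Prod.fst) (List.mem_filter.1 hx).1)

lemma pvInner_keys_nodup (its : List ((String × String) × Int))
    (hnd : (its.map Prod.fst).Nodup) (p : String) : (pvInner its p).keys.Nodup := by
  have h1 : ((its.filter (fun x => x.1.1 == p)).map Prod.fst).Nodup :=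
    List.Nodup.sublist (List.Sublist.map Prod.fst List.filter_sublist) hnd
  have h2 : ∀ z ∈ (its.filter (fun x => x.1.1 == p)).map Prod.fst, z.1 = p := by
    intro z hz
    obtain ⟨x, hx, rfl⟩ := List.mem_map.1 hz
    simpa using (List.mem_filter.1 hx).2
  have h3 := List.Nodup.map_on (f := Prod.snd)
    (fun x hx y hy hxy => Prod.ext ((h2 x hx).trans (h2 y hy).symm) hxy) h1
  simp only [PySem.Dict.keys, pvInner, List.map_map]
  simpa [List.map_map, Function.comp] using h3

lemma pvStepB_fresh (its : List ((String × String) × Int)) (e : String × String) (c : Int)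
    (he : e ∉ its.map Prod.fst) :
    pvStepB (pvNested its) (e, c) = pvNested (its ++ [(e, c)]) := by
  have hg := pvNested_get? its e.1
  have hmap : (its ++ [(e, c)]).map (fun x => x.1.1) = its.map (fun x => x.1.1) ++ [e.1] := by
    simp
  apply PySem.Dict.ext
  by_cases hp : e.1 ∈ its.map (fun x => x.1.1)
  · rw [if_pos hp] at hg
    have hc : (pvNested its).contains e.1 = true := by
      rw [PySem.Dict.contains_eq_isSome_get?, hg]; rfl
    have hti := pvInner_not_contains its e he
    show (pvStepB (pvNested its) (e, c)).items = _
    unfold pvStepB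
    rw [hg, Option.getD_some, PySem.Dict.items_insert_of_contains _ _ hc]
    show ((PySem.Set.ofList (its.map (fun x => x.1.1))).map
        (fun p => (p, pvInner its p))).map _ = _
    show _ = (PySem.Set.ofList ((its ++ [(e, c)]).map (fun x => x.1.1))).map
        (fun p => (p, pvInner (its ++ [(e, c)]) p))
    rw [hmap, pvOfListSnoc, if_pos hp, List.map_map]
    apply List.map_congr_left
    intro p hpm
    by_cases hpe : p = e.1
    · subst hpe
      simp only [Function.comp_apply, BEq.rfl, if_pos]
      refine Prod.ext rfl ?_
      apply PySem.Dict.ext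
      rw [PySem.Dict.items_insert_of_not_contains _ _ hti,
          pvInner_snoc_eq its (e, c) e.1 rfl]
    · simp only [Function.comp_apply]
      rw [if_neg (by simpa using hpe), pvInner_snoc_ne its (e, c) p (fun h => hpe h.symm)]
  · rw [if_neg hp] at hg
    have hc : (pvNested its).contains e.1 = false := by
      rw [PySem.Dict.contains_eq_isSome_get?, hg]; rfl
    show (pvStepB (pvNested its) (e, c)).items = _
    unfold pvStepB
    rw [hg, PySem.Dict.items_insert_of_not_contains _ _ hc]
    show ((PySem.Set.ofList (its.map (fun x => x.1.1))).map
        (fun p => (p, pvInner its p))) ++ _ = _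
    show _ = (PySem.Set.ofList ((its ++ [(e, c)]).map (fun x => x.1.1))).map
        (fun p => (p, pvInner (its ++ [(e, c)]) p))
    rw [hmap, pvOfListSnoc, if_neg hp, List.map_append]
    congr 1
    · apply List.map_congr_left
      intro p hpm
      have hpe : e.1 ≠ p := fun h => hp (h ▸ (PySem.Set.mem_ofList _ _).1 hpm)
      rw [pvInner_snoc_ne its (e, c) p hpe]
    · simp only [List.map_cons, List.map_nil]
      refine congrArg (fun z => [z]) (Prod.ext rfl ?_)
      apply PySem.Dict.ext
      rw [pvInner_snoc_eq its (e, c) e.1 rfl]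
      have h0 : (pvInner its e.1).items = [] := by
        unfold pvInner
        rw [pvInner_filter_nil its e.1 hp]
        rfl
      rw [h0]
      rfl

lemma pvStepK_fresh (its : List ((String × String) × Int)) (e : String × String) (c : Int)
    (he : e ∉ its.map Prod.fst) :
    pvStepK (pvNested its) (e, c) = pvNested (its ++ [(e, c)]) := by
  have hg := pvNested_get? its e.1
  have hstep : pvStepK (pvNested its) (e, c) = pvStepB (pvNested its) (e, c) := by
    unfold pvStepK pvStepB
    by_cases hp : e.1 ∈ its.map (fun x => x.1.1)
    · rw [if_pos hp] at hg
      have hti := pvInner_not_contains its e he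
      simp only [hg, Option.getD_some]
      rw [PySem.Dict.getD_of_not_contains _ 0 hti, zero_add]
    · rw [if_neg hp] at hg
      simp only [hg, Option.getD_none]
      rw [PySem.Dict.getD_empty, zero_add]
  rw [hstep]
  exact pvStepB_fresh its e c he

lemma pvStepK_present (its : List ((String × String) × Int)) (e : String × String) (c : Int)
    (hnd : (its.map Prod.fst).Nodup) (he : e ∈ its.map Prod.fst) :
    pvStepK (pvNested its) (e, c) =
      pvNested (its.map (fun x => if x.1 == e then (x.1, x.2 + c) else x)) := by
  obtain ⟨x0, hx0, rfl⟩ := List.mem_map.1 he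
  have hp : x0.1.1 ∈ its.map (fun x => x.1.1) := List.mem_map_of_mem (f := fun x => x.1.1) hx0
  have hg := pvNested_get? its x0.1.1
  rw [if_pos hp] at hg
  have hc : (pvNested its).contains x0.1.1 = true := by
    rw [PySem.Dict.contains_eq_isSome_get?, hg]; rfl
  have hknd := pvInner_keys_nodup its hnd x0.1.1
  have hmemf : x0 ∈ its.filter (fun x => x.1.1 == x0.1.1) :=
    List.mem_filter.2 ⟨hx0, by simp⟩
  have hmem_inner : (x0.1.2, x0.2) ∈ (pvInner its x0.1.1).items :=
    List.mem_map_of_mem (f := fun x => (x.1.2, x.2)) hmemf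
  have hci : (pvInner its x0.1.1).contains x0.1.2 = true := by
    rw [PySem.Dict.contains_eq_isSome_get?,
      PySem.Dict.get?_of_mem_items _ hmem_inner hknd]; rfl
  have hgd : (pvInner its x0.1.1).getD x0.1.2 0 = x0.2 :=
    PySem.Dict.getD_of_mem_items _ hmem_inner hknd 0
  have hK : (its.map (fun x => if x.1 == x0.1 then (x.1, x.2 + c) else x)).map (fun x => x.1.1)
      = its.map (fun x => x.1.1) := by
    rw [List.map_map]
    apply List.map_congr_left
    intro x _
    simp only [Function.comp_apply]
    split <;> rfl
  apply PySem.Dict.ext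
  unfold pvStepK
  simp only [hg, Option.getD_some, hgd]
  rw [PySem.Dict.items_insert_of_contains _ _ hc]
  show ((PySem.Set.ofList (its.map (fun x => x.1.1))).map
      (fun p => (p, pvInner its p))).map _ = _
  show _ = (PySem.Set.ofList ((its.map (fun x => if x.1 == x0.1 then (x.1, x.2 + c) else x)).map
      (fun x => x.1.1))).map (fun p => (p, pvInner (its.map (fun x => if x.1 == x0.1 then (x.1, x.2 + c) else x)) p))
  rw [hK, List.map_map]
  apply List.map_congr_left
  intro p hpm
  by_cases hpe : p = x0.1.1
  · subst hpe
    simp only [Function.comp_apply, BEq.rfl, if_pos]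
    refine Prod.ext rfl ?_
    apply PySem.Dict.ext
    rw [PySem.Dict.items_insert_of_contains _ _ hci]
    show ((its.filter (fun x => x.1.1 == x0.1.1)).map (fun x => (x.1.2, x.2))).map _ = _
    show _ = ((its.map (fun x => if x.1 == x0.1 then (x.1, x.2 + c) else x)).filter
        (fun x => x.1.1 == x0.1.1)).map (fun x => (x.1.2, x.2))
    rw [List.filter_map]
    have hfc : (its.filter ((fun x => x.1.1 == x0.1.1) ∘ (fun x => if x.1 == x0.1 then (x.1, x.2 + c) else x)))
        = its.filter (fun x => x.1.1 == x0.1.1) := by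
      apply List.filter_congr
      intro x _
      simp only [Function.comp_apply]
      split <;> rfl
    rw [hfc, List.map_map, List.map_map]
    apply List.map_congr_left
    intro y hy
    have hy1 : y.1.1 = x0.1.1 := by simpa using (List.mem_filter.1 hy).2
    by_cases hye : y.1 = x0.1
    · have hv : y.2 = x0.2 :=
        pvKeyVal its hnd (hye ▸ (List.mem_filter.1 hy).1 : (x0.1, y.2) ∈ its)
          (by simpa using hx0)
      simp only [Function.comp_apply, hye, BEq.rfl, if_pos]
      simp [hv]
    · have hy2 : y.1.2 ≠ x0.1.2 := fun h2 => hye (Prod.ext (hy1.trans rfl) h2)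
      simp only [Function.comp_apply]
      rw [if_neg (by simpa using hy2), if_neg (by simpa using hye)]
  · simp only [Function.comp_apply]
    rw [if_neg (by simpa using hpe)]
    refine Prod.ext rfl ?_
    apply PySem.Dict.ext
    show ((its.filter (fun x => x.1.1 == p)).map (fun x => (x.1.2, x.2))) = _
    show _ = ((its.map (fun x => if x.1 == x0.1 then (x.1, x.2 + c) else x)).filter
        (fun x => x.1.1 == p)).map (fun x => (x.1.2, x.2))
    rw [List.filter_map]
    have hfc : (its.filter ((fun x => x.1.1 == p) ∘ (fun x => if x.1 == x0.1 then (x.1, x.2 + c) else x)))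
        = its.filter (fun x => x.1.1 == p) := by
      apply List.filter_congr
      intro x _
      simp only [Function.comp_apply]
      split <;> rfl
    rw [hfc, List.map_map]
    apply List.map_congr_left
    intro y hy
    have hy1 : y.1.1 = p := by simpa using (List.mem_filter.1 hy).2
    have hye : ¬ (y.1 = x0.1) := fun h => hpe (by rw [← hy1, h])
    simp only [Function.comp_apply]
    rw [if_neg (by simpa using hye)]

lemma pvStepA_eq_K (pre : PySem.Dict String (PySem.Dict String Int)) (e : String × String) :
    pvStepA pre e = pvStepK pre (e, 1) := by
  unfold pvStepA pvStepK
  by_cases hp : pre.contains e.1 = true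
  · simp only [hp, if_true]
    by_cases ht : ((pre.get? e.1).getD PySem.Dict.empty).contains e.2 = true
    · simp only [ht, if_true]
    · simp only [Bool.not_eq_true] at ht
      simp only [ht, Bool.false_eq_true, if_false]
      rw [PySem.Dict.getD_of_not_contains _ 0 ht, zero_add]
  · simp only [Bool.not_eq_true] at hp
    simp only [hp, Bool.false_eq_true, if_false]
    have hg : pre.get? e.1 = none := by
      have := PySem.Dict.contains_eq_isSome_get? pre e.1
      rw [hp] at this
      exact Option.not_isSome_iff_eq_none.1 (by rw [← this]; simp)
    rw [hg]
    simp only [Option.getD_none]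
    rw [PySem.Dict.getD_empty, zero_add]
    rfl

lemma pvAgg_keys (M : List ((String × String) × Int)) :
    (pvAgg M).map Prod.fst = PySem.Set.ofList (M.map Prod.fst) := by
  simp [pvAgg, List.map_map, Function.comp_def]

lemma pvFoldK (M : List ((String × String) × Int)) :
    M.foldl pvStepK PySem.Dict.empty = pvNested (pvAgg M) := by
  induction M using List.reverseRecOn with
  | nil => rfl
  | append_singleton M x ih =>
    rw [List.foldl_append, List.foldl_cons, List.foldl_nil, ih]
    have hmapfst : (M ++ [x]).map Prod.fst = M.map Prod.fst ++ [x.1] := by simp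
    by_cases hmem : x.1 ∈ M.map Prod.fst
    · rw [show x = (x.1, x.2) from rfl,
        pvStepK_present (pvAgg M) x.1 x.2
          (by rw [pvAgg_keys]; exact PySem.Set.nodup_ofList _)
          (by rw [pvAgg_keys]; exact (PySem.Set.mem_ofList _ _).2 hmem)]
      congr 1
      unfold pvAgg
      rw [hmapfst, pvOfListSnoc, if_pos hmem, List.map_map]
      apply List.map_congr_left
      intro k hk
      simp only [Function.comp_apply]
      by_cases hke : k = x.1
      · subst hke
        rw [if_pos (by simp)]
        refine Prod.ext rfl ?_
        rw [List.filter_append]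
        have hfx : [x].filter (fun y => y.1 == x.1) = [x] := by simp
        rw [hfx, List.map_append, List.sum_append]
        simp
      · rw [if_neg (by simpa using hke)]
        refine Prod.ext rfl ?_
        rw [List.filter_append]
        have hfx : [x].filter (fun y => y.1 == k) = [] := by simp [Ne.symm hke]
        rw [hfx, List.append_nil]
    · rw [show x = (x.1, x.2) from rfl,
        pvStepK_fresh (pvAgg M) x.1 x.2
          (by rw [pvAgg_keys]; exact fun h => hmem ((PySem.Set.mem_ofList _ _).1 h))]
      congr 1
      unfold pvAgg
      rw [hmapfst, pvOfListSnoc, if_neg hmem, List.map_append]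
      congr 1
      · apply List.map_congr_left
        intro k hk
        refine Prod.ext rfl ?_
        have hke : k ≠ x.1 := fun h => hmem (h ▸ (PySem.Set.mem_ofList _ _).1 hk)
        rw [List.filter_append]
        have hfx : [x].filter (fun y => y.1 == k) = [] := by simp [Ne.symm hke]
        rw [hfx, List.append_nil]
      · simp only [List.map_cons, List.map_nil]
        refine congrArg (fun z => [z]) (Prod.ext rfl ?_)
        rw [List.filter_append]
        have hfM : M.filter (fun y => y.1 == x.1) = [] := by
          rw [List.filter_eq_nil_iff]
          intro y hy hbeq
          exact hmem (List.mem_map.2 ⟨y, hy, by simpa using hbeq⟩)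
        have hfx : [x].filter (fun y => y.1 == x.1) = [x] := by simp
        rw [hfM, hfx, List.nil_append]
        simp

lemma pvSumIte (l : List (String × String)) (x : String × String) (c : Int)
    (hnd : l.Nodup) (hx : x ∈ l) :
    (l.map (fun z => if z = x then c else 0)).sum = c := by
  induction l with
  | nil => cases hx
  | cons b l ih =>
    rw [List.map_cons, List.sum_cons]
    by_cases hbx : b = x
    · subst hbx
      rw [if_pos rfl]
      have hz : l.map (fun z => if z = b then c else 0) = l.map (fun _ => (0 : Int)) := by
        apply List.map_congr_left
        intro z hzl
        rw [if_neg (fun h => (List.nodup_cons.1 hnd).1 (by rw [← h]; exact hzl))]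
      rw [hz, PySem.List.sum_map_const_int, mul_zero, add_zero]
    · rw [if_neg hbx]
      have hm : x ∈ l := by
        rcases List.mem_cons.1 hx with h | h
        · exact absurd h.symm hbx
        · exact h
      rw [ih (List.nodup_cons.1 hnd).2 hm, zero_add]

lemma pvGroupCount (P : List (String × String)) (g : (String × String) → Int) :
    ((PySem.Set.ofList P).map (fun pr => g pr * (List.count pr P : Int))).sum
      = (P.map g).sum := by
  induction P using List.reverseRecOn with
  | nil => rfl
  | append_singleton P x ih =>
    rw [List.map_append, List.sum_append]
    by_cases hx : x ∈ P
    · rw [pvOfListSnoc, if_pos hx]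
      have hcongr : (PySem.Set.ofList P).map (fun pr => g pr * (List.count pr (P ++ [x]) : Int))
          = (PySem.Set.ofList P).map
              (fun pr => g pr * (List.count pr P : Int) + (if pr = x then g x else 0)) := by
        apply List.map_congr_left
        intro pr hpr
        rw [List.count_append]
        by_cases hpe : pr = x
        · subst hpe
          have h1 : List.count pr [pr] = 1 := by simp
          rw [h1, if_pos rfl]
          push_cast
          ring
        · have h0 : List.count pr [x] = 0 := List.count_eq_zero.2 (by simp [hpe])
          rw [h0, if_neg hpe]
          push_cast
          ring
      rw [hcongr, PySem.List.sum_map_add_int,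
        pvSumIte _ x (g x) (PySem.Set.nodup_ofList P) ((PySem.Set.mem_ofList P x).2 hx), ih]
      simp
    · rw [pvOfListSnoc, if_neg hx, List.map_append, List.sum_append]
      congr 1
      · rw [← ih]
        apply congrArg List.sum
        apply List.map_congr_left
        intro pr hpr
        have hpe : pr ≠ x := fun h => hx (h ▸ (PySem.Set.mem_ofList P pr).1 hpr)
        rw [List.count_append]
        have h0 : List.count pr [x] = 0 := List.count_eq_zero.2 (by simp [hpe])
        rw [h0]
        push_cast
        ring
      · simp only [List.map_cons, List.map_nil, List.sum_cons, List.sum_nil]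
        rw [List.count_append, List.count_eq_zero_of_not_mem hx]
        simp

lemma pvCountFlatMap (P : List (String × String)) (k : String × String) :
    ((List.count k (P.flatMap pvEv)) : Int)
      = (P.map (fun pr => (List.count k (pvEv pr) : Int))).sum := by
  induction P with
  | nil => rfl
  | cons a P ih =>
    rw [List.flatMap_cons, List.count_append, List.map_cons, List.sum_cons, ← ih]
    push_cast
    ring

lemma pvSetFlatMap (P : List (String × String)) (f : (String × String) → List (String × String)) :
    PySem.Set.ofList ((PySem.Set.ofList P).flatMap f) = PySem.Set.ofList (P.flatMap f) := by
  induction P using List.reverseRecOn with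
  | nil => rfl
  | append_singleton P x ih =>
    have hR : (P ++ [x]).flatMap f = P.flatMap f ++ f x := by simp
    rw [hR, pvOfListSnoc]
    by_cases hx : x ∈ P
    · rw [if_pos hx, ih, PySem.Set.ofList_append]
      refine (pvUpdateSubset _ _ ?_).symm
      intro a ha
      exact (PySem.Set.mem_ofList _ _).2 (List.mem_flatMap.2 ⟨x, hx, ha⟩)
    · rw [if_neg hx]
      have hL : (PySem.Set.ofList P ++ [x]).flatMap f = (PySem.Set.ofList P).flatMap f ++ f x := by
        simp
      rw [hL, PySem.Set.ofList_append, PySem.Set.ofList_append, ih]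

lemma pvSum_eq (P : List (String × String)) (k : String × String) :
    ((((pvCItems P).flatMap (fun y => (pvEv y.1).map (fun e => (e, y.2)))).filter
        (fun x => x.1 == k)).map Prod.snd).sum
      = ((((P.flatMap pvEv).map (fun e => (e, (1 : Int)))).filter
          (fun x => x.1 == k)).map Prod.snd).sum := by
  -- right side: sum of ones over the occurrences of k = count
  have hR : ((((P.flatMap pvEv).map (fun e => (e, (1 : Int)))).filter
      (fun x => x.1 == k)).map Prod.snd).sum = ((List.count k (P.flatMap pvEv)) : Int) := by
    rw [List.filter_map, List.map_map]
    have h2 : ((fun x : (String × String) × Int => x.1 == k) ∘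
        (fun e : String × String => (e, (1 : Int)))) = (fun e => e == k) := rfl
    have h3 : (Prod.snd ∘ (fun e : String × String => (e, (1 : Int))))
        = (fun _ => (1 : Int)) := rfl
    rw [h2, h3, PySem.List.sum_map_const_int]
    simp only [List.count_eq_length_filter]
    try push_cast
    try ring
  -- left side: per distinct pair, count-in-events times multiplicity
  have hL : ((((pvCItems P).flatMap (fun y => (pvEv y.1).map (fun e => (e, y.2)))).filter
      (fun x => x.1 == k)).map Prod.snd).sum
      = ((PySem.Set.ofList P).map
          (fun pr => (List.count k (pvEv pr) : Int) * (List.count pr P : Int))).sum := by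
    rw [List.filter_flatMap, List.map_flatMap, List.flatMap_def, List.sum_flatten, List.map_map]
    unfold pvCItems
    rw [List.map_map]
    apply congrArg List.sum
    apply List.map_congr_left
    intro pr _
    simp only [Function.comp_apply]
    rw [List.filter_map, List.map_map]
    have h2 : ((fun x : (String × String) × Int => x.1 == k) ∘
        (fun e : String × String => (e, (List.count pr P : Int)))) = (fun e => e == k) := rfl
    have h3 : (Prod.snd ∘ (fun e : String × String => (e, (List.count pr P : Int))))
        = (fun _ => (List.count pr P : Int)) := rfl
    rw [h2, h3, PySem.List.sum_map_const_int]
    simp only [List.count_eq_length_filter]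
    try push_cast
    try ring
  rw [hL, hR, pvCountFlatMap, pvGroupCount]

lemma pvAgg_eq (P : List (String × String)) :
    pvAgg ((pvCItems P).flatMap (fun y => (pvEv y.1).map (fun e => (e, y.2))))
      = pvAgg ((P.flatMap pvEv).map (fun e => (e, (1 : Int)))) := by
  unfold pvAgg
  have hkL : ((pvCItems P).flatMap (fun y => (pvEv y.1).map (fun e => (e, y.2)))).map Prod.fst
      = (PySem.Set.ofList P).flatMap pvEv := by
    rw [List.map_flatMap]
    unfold pvCItems
    rw [List.flatMap_map]
    refine congrArg (fun f => List.flatMap f (PySem.Set.ofList P)) (funext fun pr => ?_)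
    simp [List.map_map, Function.comp_def]
  have hkE : (((P.flatMap pvEv)).map (fun e => (e, (1 : Int)))).map Prod.fst = P.flatMap pvEv := by
    simp [List.map_map, Function.comp_def]
  rw [hkL, hkE, pvSetFlatMap]
  apply List.map_congr_left
  intro k _
  exact Prod.ext rfl (pvSum_eq P k)

lemma pvZipMap (words tag : List String) (h : words.length ≤ tag.length) :
    (PySem.List.pyRange 0 (words.length : Int) 1).map
      (fun i => (PySem.List.pyGetD words i "", PySem.List.pyGetD tag i "")) = words.zip tag := by
  apply List.ext_getElem
  · simp [PySem.List.length_pyRange_one]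
    omega
  · intro k h1 h2
    have hk1 : k < words.length := by
      simp only [List.length_map, PySem.List.length_pyRange_one] at h1
      omega
    have hk2 : k < tag.length := by omega
    rw [List.getElem_map, PySem.List.getElem_pyRange_one, List.getElem_zip]
    rw [zero_add]
    rw [PySem.List.pyGetD_natCast, PySem.List.pyGetD_natCast]
    rw [List.getD_eq_getElem words "" hk1, List.getD_eq_getElem tag "" hk2]

lemma pvDictA (words tag : List String) (h : words.length ≤ tag.length) :
    (PySem.List.pyRange 0 (words.length : Int) 1).foldl (fun pre i =>
      (PySem.List.pyRange 2 ((6 : Int) + 1) 1).foldl (fun pre j =>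
        let wi := PySem.List.pyGetD words i ""
        let ti := PySem.List.pyGetD tag i ""
        let prefix1 : String := if PySem.Str.len wi > j - 1 then PySem.Str.slice wi none (some j) else ""
        if pre.contains prefix1 then
          let inner := (pre.get? prefix1).getD PySem.Dict.empty
          if inner.contains ti then
            pre.insert prefix1 (inner.insert ti (inner.getD ti 0 + 1))
          else
            pre.insert prefix1 (inner.insert ti 1)
        else
          pre.insert prefix1 (PySem.Dict.ofList [(ti, 1)])) pre) PySem.Dict.empty
    = ((words.zip tag).flatMap pvEv).foldl pvStepA PySem.Dict.empty := by
  have h67 : ((6 : Int) + 1) = 7 := by norm_num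
  rw [h67]
  have step1 : ∀ (acc : PySem.Dict String (PySem.Dict String Int)) (i : Int),
      i ∈ PySem.List.pyRange 0 (words.length : Int) 1 →
      (PySem.List.pyRange 2 7 1).foldl (fun pre j =>
        let wi := PySem.List.pyGetD words i ""
        let ti := PySem.List.pyGetD tag i ""
        let prefix1 : String := if PySem.Str.len wi > j - 1 then PySem.Str.slice wi none (some j) else ""
        if pre.contains prefix1 then
          let inner := (pre.get? prefix1).getD PySem.Dict.empty
          if inner.contains ti then
            pre.insert prefix1 (inner.insert ti (inner.getD ti 0 + 1))
          else
            pre.insert prefix1 (inner.insert ti 1)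
        else
          pre.insert prefix1 (PySem.Dict.ofList [(ti, 1)])) acc
      = (pvEv ((fun i => (PySem.List.pyGetD words i "", PySem.List.pyGetD tag i "")) i)).foldl pvStepA acc := by
    intro acc i _
    unfold pvEv
    rw [List.foldl_map]
    apply PySem.List.foldl_congr_mem
    intro acc' j _
    have hpp : (if PySem.Str.len (PySem.List.pyGetD words i "") > j - 1
          then PySem.Str.slice (PySem.List.pyGetD words i "") none (some j) else "")
        = (if PySem.Str.len (PySem.List.pyGetD words i "") ≥ j
          then PySem.Str.slice (PySem.List.pyGetD words i "") none (some j) else "") :=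
      if_congr (by omega) rfl rfl
    show _ = pvStepA acc' _
    unfold pvStepA
    rw [← hpp]
  have e1 := PySem.List.foldl_congr_mem _ _ _ (PySem.Dict.empty : PySem.Dict String (PySem.Dict String Int)) step1
  rw [e1]
  rw [← List.foldl_map (f := fun i => (PySem.List.pyGetD words i "", PySem.List.pyGetD tag i ""))
    (g := fun acc wt => (pvEv wt).foldl pvStepA acc)]
  rw [pvZipMap words tag h]
  rw [← List.foldl_flatMap]

lemma pvDictB (words tag : List String) :
    ((words.zip tag).foldl (fun d wt => d.insert wt (d.getD wt 0 + 1)) PySem.Dict.empty).items.foldl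
      (fun r x =>
        (PySem.List.pyRange 2 7 1).foldl (fun r j =>
          let p : String := if PySem.Str.len x.1.1 ≥ j then PySem.Str.slice x.1.1 none (some j) else ""
          let inner := (r.get? p).getD PySem.Dict.empty
          r.insert p (inner.insert x.1.2 (inner.getD x.1.2 0 + x.2))) r) PySem.Dict.empty
    = ((pvCItems (words.zip tag)).flatMap (fun y => (pvEv y.1).map (fun e => (e, y.2)))).foldl
        pvStepK PySem.Dict.empty := by
  rw [PySem.Dict.foldl_insert_getD_add_one_eq_counter, PySem.Dict.items_counter,
    List.foldl_flatMap]
  unfold pvCItems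
  apply PySem.List.foldl_congr_mem
  intro acc y _
  unfold pvEv
  rw [List.foldl_map, List.foldl_map]
  apply PySem.List.foldl_congr_mem
  intro acc' j _
  rfl

lemma pvMainEq (words tag : List String) (h : words.length ≤ tag.length) :
    createPrefixDict words tag = createPrefixDict_alt words tag := by
  unfold createPrefixDict createPrefixDict_alt
  refine congrArg (fun d : PySem.Dict String (PySem.Dict String Int) =>
    d.items.map (fun kv => (kv.1, kv.2.items))) ?_
  rw [pvDictA words tag h, pvDictB words tag]
  have hf : (fun (a : PySem.Dict String (PySem.Dict String Int)) (e : String × String) =>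
      pvStepK a (e, 1)) = pvStepA :=
    funext fun a => funext fun e => (pvStepA_eq_K a e).symm
  calc ((words.zip tag).flatMap pvEv).foldl pvStepA PySem.Dict.empty
      = (((words.zip tag).flatMap pvEv).map (fun e => (e, (1 : Int)))).foldl pvStepK
          PySem.Dict.empty := by rw [List.foldl_map, hf]
    _ = pvNested (pvAgg (((words.zip tag).flatMap pvEv).map (fun e => (e, (1 : Int))))) :=
        pvFoldK _
    _ = pvNested (pvAgg ((pvCItems (words.zip tag)).flatMap
          (fun y => (pvEv y.1).map (fun e => (e, y.2))))) := by rw [pvAgg_eq]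
    _ = ((pvCItems (words.zip tag)).flatMap
          (fun y => (pvEv y.1).map (fun e => (e, y.2)))).foldl pvStepK PySem.Dict.empty :=
        (pvFoldK _).symm

-- ===== VERDICT (by name: the statement is the Claim_ definition above) =====
theorem createPrefixDict_spec : Claim_equal_createPrefixDict := by
  intro words tag _ hpre
  exact (pvMainEq words tag hpre).symm ▸ rfl
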